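-- pv_equiv track=rewrite | github.com/sohyunzzq/codetree-TILs | 240721/2개 이상의 알파벳/more-than-one-alphabet.py | alpha
-- ===== SOURCE A (Python) =====
-- def alpha(str1):
--     dict1 = {}
--
--     for i in str1:
--         if str1 in dict1:
--             dict1[i] += 1
--         else:
--             dict1[i] = 0
--
--     if len(dict1) >= 2:
--         return True
--     return False
-- ===== SOURCE B (Python) =====
-- def alpha(str1):
--     return any(c != str1[0] for c in str1)
-- ===== Notes on version B (the rewrite author's own statement) =====
-- stated objective: simpler
-- what changed: Replaces the frequency-dict build-and-size with a single short-circuiting scan that checks whether any character differs from the first one.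
import Mathlib
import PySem

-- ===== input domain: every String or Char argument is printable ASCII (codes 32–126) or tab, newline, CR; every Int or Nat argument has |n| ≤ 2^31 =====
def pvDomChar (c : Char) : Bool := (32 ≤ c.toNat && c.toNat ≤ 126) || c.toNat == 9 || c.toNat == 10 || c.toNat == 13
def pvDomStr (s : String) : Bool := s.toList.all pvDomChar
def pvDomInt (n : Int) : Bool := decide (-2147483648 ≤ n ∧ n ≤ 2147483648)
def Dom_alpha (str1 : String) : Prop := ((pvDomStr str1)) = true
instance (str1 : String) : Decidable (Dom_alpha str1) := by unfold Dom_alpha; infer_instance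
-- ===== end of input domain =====

-- B replaces A's frequency-dict build-and-size with a single scan checking whether any character differs from the first one (simpler).


-- ===== PORT A =====
-- literal port: dict keyed by the 1-char strings Python iterates over; the (vacuous) 'str1 in dict1' test kept as-is
def alpha (str1 : String) : Bool :=
  let dict1 := str1.toList.foldl (fun d i =>
    if d.contains str1 then d.insert (String.ofList [i]) (d.getD (String.ofList [i]) 0 + 1)
    else d.insert (String.ofList [i]) 0) (PySem.Dict.empty (κ := String) (ν := Int))
  if 2 ≤ dict1.size then true else false

-- ===== PORT B =====
def alpha_alt (str1 : String) : Bool :=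
  match str1.toList with
  | [] => false
  | c0 :: rest => (c0 :: rest).any (fun c => c != c0)

-- ===== PRECONDITION & SPEC =====
def Spec_alpha (str1 : String) (out : Bool) : Prop := out = alpha_alt str1
instance (str1 : String) (out : Bool) : Decidable (Spec_alpha str1 out) := by unfold Spec_alpha; infer_instance

-- ===== CLAIM (what is proved, stated in full; the proofs are below) =====
def Claim_equal_alpha : Prop := ∀ (str1 : String), Dom_alpha str1 → Spec_alpha str1 (alpha str1)

-- ===== LEMMAS AND PROOFS =====

-- both branches of A's loop body insert at the same key
theorem alpha_step_eq (str1 : String) :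
    (fun (d : PySem.Dict String Int) (i : Char) =>
      if d.contains str1 then d.insert (String.ofList [i]) (d.getD (String.ofList [i]) 0 + 1)
      else d.insert (String.ofList [i]) 0)
    = (fun d i => d.insert (String.ofList [i])
        (if d.contains str1 then d.getD (String.ofList [i]) 0 + 1 else 0)) := by
  funext d i; split <;> rfl

theorem ofList_singleton_inj {a b : Char} (h : String.ofList [a] = String.ofList [b]) : a = b := by
  have := congrArg String.toList h
  simpa using this

-- A's dict ends with one key per distinct character of str1
theorem alpha_size_eq (str1 : String) :
    (str1.toList.foldl (fun (d : PySem.Dict String Int) i => d.insert (String.ofList [i])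
        (if d.contains str1 then d.getD (String.ofList [i]) 0 + 1 else 0)) PySem.Dict.empty).size
      = (PySem.Set.ofList (str1.toList.map (fun i => String.ofList [i]))).length := by
  have h1 : ∀ (d : PySem.Dict String Int), d.size = d.keys.length := by
    intro d; simp only [PySem.Dict.size, PySem.Dict.keys, List.length_map]
  rw [h1]
  rw [PySem.Dict.keys_foldl_insert_key (l := str1.toList) (key := fun i => String.ofList [i])
      (f := fun (d : PySem.Dict String Int) i => if d.contains str1 then d.getD (String.ofList [i]) 0 + 1 else 0)
      (d := PySem.Dict.empty)]
  simp [PySem.Dict.keys_empty, PySem.Set.update_nil_left]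

-- the key content: A's dict size ≥ 2 iff some character differs from the first
theorem size_iff_any (c0 : Char) (l : List Char) :
    (2 ≤ (PySem.Set.ofList ((c0 :: l).map (fun i => String.ofList [i]))).length)
    ↔ (l.any (fun c => c != c0) = true) := by
  rw [List.map_cons, PySem.Set.ofList_cons]
  simp only [List.length_cons]
  constructor
  · intro h
    have hne : (PySem.Set.discard (PySem.Set.ofList (l.map (fun i => String.ofList [i]))) (String.ofList [c0])) ≠ [] := by
      intro hnil; rw [hnil] at h; simp at h
    obtain ⟨y, hy⟩ := List.exists_mem_of_ne_nil _ hne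
    rw [PySem.Set.mem_discard] at hy
    obtain ⟨hy1, hy2⟩ := hy
    rw [PySem.Set.mem_ofList] at hy1
    obtain ⟨c, hc, rfl⟩ := List.mem_map.mp hy1
    rw [List.any_eq_true]
    exact ⟨c, hc, by simp; intro h'; exact hy2 (by rw [h'])⟩
  · intro h
    rw [List.any_eq_true] at h
    obtain ⟨c, hc, hne⟩ := h
    have hne' : c ≠ c0 := by simpa using hne
    have hy : String.ofList [c] ∈ PySem.Set.discard (PySem.Set.ofList (l.map (fun i => String.ofList [i]))) (String.ofList [c0]) := by
      rw [PySem.Set.mem_discard]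
      refine ⟨?_, fun h' => hne' (ofList_singleton_inj h')⟩
      rw [PySem.Set.mem_ofList]
      exact List.mem_map_of_mem hc
    have : 0 < (PySem.Set.discard (PySem.Set.ofList (l.map (fun i => String.ofList [i]))) (String.ofList [c0])).length :=
      List.length_pos_of_mem hy
    omega

-- ===== VERDICT (by name: the statement is the Claim_ definition above) =====
theorem alpha_spec : Claim_equal_alpha := by
  intro str1 _
  unfold Spec_alpha alpha alpha_alt
  simp only []
  rw [alpha_step_eq, alpha_size_eq]
  generalize str1.toList = L
  cases L with
  | nil => simp
  | cons c0 rest =>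
    dsimp only
    rw [List.any_cons]
    simp only [bne_self_eq_false, Bool.false_or]
    by_cases h : rest.any (fun c => c != c0) = true
    · rw [if_pos ((size_iff_any c0 rest).mpr h), h]
    · rw [if_neg (fun hs => h ((size_iff_any c0 rest).mp hs))]
      exact ((Bool.not_eq_true _).mp h).symm
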